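-- pv_equiv track=rewrite | github.com/NavjotSingh-ca/nexus-sovereign | src/general/reporter.py | categorize_activity
-- ===== SOURCE A (Python) =====
-- def categorize_activity(entries):
--     """Categorize ledger entries by type"""
--     categories = {
--         "security_alerts": [],
--         "market_intelligence": [],
--         "system_health": [],
--         "planning": [],
--         "research": []
--     }
--
--     for entry in entries:
--         msg_type = entry.get("message_type", "")
--         agent_type = entry.get("agent_type", "")
--
--         if msg_type == "security_alert":
--             categories["security_alerts"].append(entry)
--         elif msg_type in ["scan_complete", "market_scan", "github_scan"]:
--             categories["market_intelligence"].append(entry)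
--         elif msg_type in ["diagnostics_complete", "simulation_complete"]:
--             categories["system_health"].append(entry)
--         elif msg_type in ["plan_validation", "plan_approved"]:
--             categories["planning"].append(entry)
--         elif agent_type == "research":
--             categories["research"].append(entry)
--
--     return categories
-- ===== SOURCE B (Python) =====
-- _RECOGNIZED = {"security_alert", "scan_complete", "market_scan", "github_scan",
--                "diagnostics_complete", "simulation_complete",
--                "plan_validation", "plan_approved"}
--
-- def categorize_activity(entries):
--     """Categorize ledger entries by type"""
--     def mt(e):
--         return e.get("message_type", "")
--     return {
--         "security_alerts": [e for e in entries if mt(e) == "security_alert"],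
--         "market_intelligence": [e for e in entries
--                                 if mt(e) in ("scan_complete", "market_scan", "github_scan")],
--         "system_health": [e for e in entries
--                           if mt(e) in ("diagnostics_complete", "simulation_complete")],
--         "planning": [e for e in entries
--                      if mt(e) in ("plan_validation", "plan_approved")],
--         "research": [e for e in entries
--                      if mt(e) not in _RECOGNIZED and e.get("agent_type", "") == "research"],
--     }
-- ===== Notes on version B (the rewrite author's own statement) =====
-- stated objective: alternative
-- what changed: A makes one pass bucketing each entry into a mutable five-list dict via an if/elif chain; B instead builds the result dict declaratively from five independent filter passes (comprehensions), one per category, with the research pass excluding all recognized message types to preserve A's branch priority.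
import Mathlib
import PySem

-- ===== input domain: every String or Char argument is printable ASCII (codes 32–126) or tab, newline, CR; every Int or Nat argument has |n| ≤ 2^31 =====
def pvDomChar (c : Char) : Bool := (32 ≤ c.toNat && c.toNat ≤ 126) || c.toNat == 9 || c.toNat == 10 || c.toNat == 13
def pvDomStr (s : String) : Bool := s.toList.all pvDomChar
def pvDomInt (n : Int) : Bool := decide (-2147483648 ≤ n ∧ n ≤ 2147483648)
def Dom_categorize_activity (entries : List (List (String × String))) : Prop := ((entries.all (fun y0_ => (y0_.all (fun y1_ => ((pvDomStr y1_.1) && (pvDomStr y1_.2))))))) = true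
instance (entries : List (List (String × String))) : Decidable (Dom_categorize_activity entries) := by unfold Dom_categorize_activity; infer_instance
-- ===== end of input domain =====

-- B replaces A's single bucketing pass (mutable five-list dict + if/elif chain) by five
-- independent filter passes, one per category (alternative decomposition; same O(n) cost).

-- entry.get(k, "") on an entry dict (first-match association-list lookup per the type convention)
def pvEntryGetD (entry : List (String × String)) (k : String) : String :=
  (PySem.Dict.mk entry).getD k ""

-- ===== PORT A =====
def categorize_activity (entries : List (List (String × String))) : List (String × List (List (String × String))) :=
  let categories : PySem.Dict String (List (List (String × String))) :=
    PySem.Dict.mk [("security_alerts", []), ("market_intelligence", []),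
                   ("system_health", []), ("planning", []), ("research", [])]
  let categories := entries.foldl (fun d entry =>
    let msg_type := pvEntryGetD entry "message_type"
    let agent_type := pvEntryGetD entry "agent_type"
    if msg_type == "security_alert" then
      d.modify "security_alerts" [] (· ++ [entry])
    else if ["scan_complete", "market_scan", "github_scan"].contains msg_type then
      d.modify "market_intelligence" [] (· ++ [entry])
    else if ["diagnostics_complete", "simulation_complete"].contains msg_type then
      d.modify "system_health" [] (· ++ [entry])
    else if ["plan_validation", "plan_approved"].contains msg_type then
      d.modify "planning" [] (· ++ [entry])
    else if agent_type == "research" then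
      d.modify "research" [] (· ++ [entry])
    else d) categories
  categories.items

-- ===== PORT B =====
-- the Python set _RECOGNIZED (distinct literals, so the PySem.Set is the list itself)
def pvRecognized : List String :=
  PySem.Set.ofList ["security_alert", "scan_complete", "market_scan", "github_scan",
                    "diagnostics_complete", "simulation_complete",
                    "plan_validation", "plan_approved"]

def pvMT (e : List (String × String)) : String := pvEntryGetD e "message_type"

def categorize_activity_alt (entries : List (List (String × String))) : List (String × List (List (String × String))) :=
  (PySem.Dict.mk
    [("security_alerts", entries.filter (fun e => pvMT e == "security_alert")),
     ("market_intelligence", entries.filter (fun e =>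
        ["scan_complete", "market_scan", "github_scan"].contains (pvMT e))),
     ("system_health", entries.filter (fun e =>
        ["diagnostics_complete", "simulation_complete"].contains (pvMT e))),
     ("planning", entries.filter (fun e =>
        ["plan_validation", "plan_approved"].contains (pvMT e))),
     ("research", entries.filter (fun e =>
        !(pvRecognized.contains (pvMT e)) && pvEntryGetD e "agent_type" == "research"))]).items

-- ===== PRECONDITION & SPEC =====
def Spec_categorize_activity (entries : List (List (String × String))) (out : List (String × List (List (String × String)))) : Prop := out = categorize_activity_alt entries
instance (entries : List (List (String × String))) (out : List (String × List (List (String × String)))) : Decidable (Spec_categorize_activity entries out) := by unfold Spec_categorize_activity; infer_instance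

-- ===== CLAIM =====
def Claim_equal_categorize_activity : Prop := ∀ (entries : List (List (String × String))), Dom_categorize_activity entries → Spec_categorize_activity entries (categorize_activity entries)

-- ===== LEMMAS AND PROOFS =====

-- the recognized-set literal, spelt out
theorem pv_rec_eq : pvRecognized =
    ["security_alert", "scan_complete", "market_scan", "github_scan",
     "diagnostics_complete", "simulation_complete", "plan_validation", "plan_approved"] := rfl

-- Dict.modify at each of the five literal keys of the invariant dict
theorem pv_mod1 (l1 l2 l3 l4 l5 : List (List (String × String))) (f : List (List (String × String)) → List (List (String × String))) :
    (PySem.Dict.mk [("security_alerts", l1), ("market_intelligence", l2), ("system_health", l3), ("planning", l4), ("research", l5)]).modify "security_alerts" [] f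
    = PySem.Dict.mk [("security_alerts", f l1), ("market_intelligence", l2), ("system_health", l3), ("planning", l4), ("research", l5)] := rfl
theorem pv_mod2 (l1 l2 l3 l4 l5 : List (List (String × String))) (f : List (List (String × String)) → List (List (String × String))) :
    (PySem.Dict.mk [("security_alerts", l1), ("market_intelligence", l2), ("system_health", l3), ("planning", l4), ("research", l5)]).modify "market_intelligence" [] f
    = PySem.Dict.mk [("security_alerts", l1), ("market_intelligence", f l2), ("system_health", l3), ("planning", l4), ("research", l5)] := rfl
theorem pv_mod3 (l1 l2 l3 l4 l5 : List (List (String × String))) (f : List (List (String × String)) → List (List (String × String))) :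
    (PySem.Dict.mk [("security_alerts", l1), ("market_intelligence", l2), ("system_health", l3), ("planning", l4), ("research", l5)]).modify "system_health" [] f
    = PySem.Dict.mk [("security_alerts", l1), ("market_intelligence", l2), ("system_health", f l3), ("planning", l4), ("research", l5)] := rfl
theorem pv_mod4 (l1 l2 l3 l4 l5 : List (List (String × String))) (f : List (List (String × String)) → List (List (String × String))) :
    (PySem.Dict.mk [("security_alerts", l1), ("market_intelligence", l2), ("system_health", l3), ("planning", l4), ("research", l5)]).modify "planning" [] f
    = PySem.Dict.mk [("security_alerts", l1), ("market_intelligence", l2), ("system_health", l3), ("planning", f l4), ("research", l5)] := rfl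
theorem pv_mod5 (l1 l2 l3 l4 l5 : List (List (String × String))) (f : List (List (String × String)) → List (List (String × String))) :
    (PySem.Dict.mk [("security_alerts", l1), ("market_intelligence", l2), ("system_health", l3), ("planning", l4), ("research", l5)]).modify "research" [] f
    = PySem.Dict.mk [("security_alerts", l1), ("market_intelligence", l2), ("system_health", l3), ("planning", l4), ("research", f l5)] := rfl

-- Loop invariant for A's fold: the dict stays a five-key literal whose lists are the
-- already-accumulated prefix buckets; B's per-category filters describe each bucket.
theorem pv_fold_invariant (es : List (List (String × String)))
    (l1 l2 l3 l4 l5 : List (List (String × String))) :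
    es.foldl (fun d entry =>
      let msg_type := pvEntryGetD entry "message_type"
      let agent_type := pvEntryGetD entry "agent_type"
      if msg_type == "security_alert" then
        d.modify "security_alerts" [] (· ++ [entry])
      else if ["scan_complete", "market_scan", "github_scan"].contains msg_type then
        d.modify "market_intelligence" [] (· ++ [entry])
      else if ["diagnostics_complete", "simulation_complete"].contains msg_type then
        d.modify "system_health" [] (· ++ [entry])
      else if ["plan_validation", "plan_approved"].contains msg_type then
        d.modify "planning" [] (· ++ [entry])
      else if agent_type == "research" then
        d.modify "research" [] (· ++ [entry])
      else d)
      (PySem.Dict.mk [("security_alerts", l1), ("market_intelligence", l2),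
                      ("system_health", l3), ("planning", l4), ("research", l5)])
    = PySem.Dict.mk
        [("security_alerts", l1 ++ es.filter (fun e => pvMT e == "security_alert")),
         ("market_intelligence", l2 ++ es.filter (fun e =>
            ["scan_complete", "market_scan", "github_scan"].contains (pvMT e))),
         ("system_health", l3 ++ es.filter (fun e =>
            ["diagnostics_complete", "simulation_complete"].contains (pvMT e))),
         ("planning", l4 ++ es.filter (fun e =>
            ["plan_validation", "plan_approved"].contains (pvMT e))),
         ("research", l5 ++ es.filter (fun e =>
            !(pvRecognized.contains (pvMT e)) && pvEntryGetD e "agent_type" == "research"))] := by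
  induction es generalizing l1 l2 l3 l4 l5 with
  | nil => simp
  | cons e es ih =>
    simp only [List.foldl_cons, List.filter_cons]
    have hmt : pvEntryGetD e "message_type" = pvMT e := rfl
    by_cases h1 : pvMT e = "security_alert"
    · simp only [hmt, h1]
      rw [if_pos (show (("security_alert" : String) == "security_alert") = true by decide),
        pv_mod1, ih]
      simp [pv_rec_eq, List.append_assoc]
    · by_cases h2 : ["scan_complete", "market_scan", "github_scan"].contains (pvMT e)
      · rcases (by simpa using h2 : pvMT e = "scan_complete" ∨ pvMT e = "market_scan" ∨ pvMT e = "github_scan") with h | h | h <;>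
        · simp only [hmt, h]
          rw [if_neg (by decide), if_pos (by decide), pv_mod2, ih]
          simp [pv_rec_eq, List.append_assoc]
      · by_cases h3 : ["diagnostics_complete", "simulation_complete"].contains (pvMT e)
        · rcases (by simpa using h3 : pvMT e = "diagnostics_complete" ∨ pvMT e = "simulation_complete") with h | h <;>
          · simp only [hmt, h]
            rw [if_neg (by decide), if_neg (by decide), if_pos (by decide), pv_mod3, ih]
            simp [pv_rec_eq, List.append_assoc]
        · by_cases h4 : ["plan_validation", "plan_approved"].contains (pvMT e)
          · rcases (by simpa using h4 : pvMT e = "plan_validation" ∨ pvMT e = "plan_approved") with h | h <;>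
            · simp only [hmt, h]
              rw [if_neg (by decide), if_neg (by decide), if_neg (by decide), if_pos (by decide),
                pv_mod4, ih]
              simp [pv_rec_eq, List.append_assoc]
          · have hb1 : ¬((pvMT e == "security_alert") = true) := by simp [h1]
            obtain ⟨g2a, g2b, g2c⟩ : ¬pvMT e = "scan_complete" ∧ ¬pvMT e = "market_scan" ∧ ¬pvMT e = "github_scan" := by
              simpa [not_or] using h2
            obtain ⟨g3a, g3b⟩ : ¬pvMT e = "diagnostics_complete" ∧ ¬pvMT e = "simulation_complete" := by
              simpa [not_or] using h3
            obtain ⟨g4a, g4b⟩ : ¬pvMT e = "plan_validation" ∧ ¬pvMT e = "plan_approved" := by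
              simpa [not_or] using h4
            have hmem : pvMT e ∉ pvRecognized := by
              rw [pv_rec_eq]
              simp only [List.mem_cons, List.not_mem_nil, or_false, not_or]
              exact ⟨h1, g2a, g2b, g2c, g3a, g3b, g4a, g4b⟩
            by_cases h5 : pvEntryGetD e "agent_type" = "research"
            · simp only [hmt]
              rw [if_neg hb1, if_neg h2, if_neg h3, if_neg h4,
                if_pos (show (pvEntryGetD e "agent_type" == "research") = true by simp [h5]),
                pv_mod5, ih]
              simp [h1, g2a, g2b, g2c, g3a, g3b, g4a, g4b, h5, hmem, List.append_assoc]
            · simp only [hmt]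
              rw [if_neg hb1, if_neg h2, if_neg h3, if_neg h4,
                if_neg (show ¬((pvEntryGetD e "agent_type" == "research") = true) by simp [h5]),
                ih]
              simp [h1, g2a, g2b, g2c, g3a, g3b, g4a, g4b, h5, hmem]

-- ===== VERDICT =====
theorem categorize_activity_spec : Claim_equal_categorize_activity := by
  intro entries _
  unfold Spec_categorize_activity categorize_activity categorize_activity_alt
  have h := pv_fold_invariant entries [] [] [] [] []
  simp only [List.nil_append] at h
  exact congrArg PySem.Dict.items h
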